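-- pv_equiv track=rewrite | github.com/SanjnaSukirti/python_practice | nom_nom.py | nom_nom
-- ===== SOURCE A (Python) =====
-- def nom_nom(l):
--     i=0
--     while i<len(l)-1:
--         if l[i]>l[i+1]:
--             l[i]=l[i]+l[i+1]
--             del l[i+1]
--         else:
--             i+=1
--     return l
-- ===== SOURCE B (Python) =====
-- def nom_nom(l):
--     if not l:
--         return []
--     res = []
--     cur = l[0]
--     for x in l[1:]:
--         if cur > x:
--             cur += x
--         else:
--             res.append(cur)
--             cur = x
--     res.append(cur)
--     return res
-- ===== Notes on version B (the rewrite author's own statement) =====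
-- stated objective: faster
-- what changed: Replaces the index/del while-loop (each del shifts the tail, O(n^2)) by a single forward pass with a running accumulator appended to a result list, O(n); B does not mutate the input list, the claim is about the return value.
import Mathlib
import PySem

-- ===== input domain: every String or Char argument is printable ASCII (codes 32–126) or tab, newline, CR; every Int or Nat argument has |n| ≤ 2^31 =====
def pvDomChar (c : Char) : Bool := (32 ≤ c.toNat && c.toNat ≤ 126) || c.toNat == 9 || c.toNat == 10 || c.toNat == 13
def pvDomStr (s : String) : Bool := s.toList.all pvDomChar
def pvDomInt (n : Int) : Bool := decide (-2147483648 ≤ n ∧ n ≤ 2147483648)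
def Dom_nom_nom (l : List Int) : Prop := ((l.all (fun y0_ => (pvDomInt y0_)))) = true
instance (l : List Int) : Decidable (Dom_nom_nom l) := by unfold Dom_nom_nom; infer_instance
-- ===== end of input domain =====

-- B replaces A's index/del while-loop by a single forward accumulator pass (O(n)).
-- A mutates its argument in place (del); the equivalence proved here is about the return value only.

-- ===== PORT A =====
-- A's while-loop: state is (l, i); 'l[i]=l[i]+l[i+1]; del l[i+1]' is set-then-eraseIdx.
-- 'fuel' is only a totality guard: each iteration lowers 2*len(l)-i, so 2*len(l)+1 steps always suffice.
def nom_nom_loop (fuel : Nat) (l : List Int) (i : Nat) : List Int :=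
  match fuel with
  | 0 => l
  | fuel + 1 =>
    if i + 1 < l.length then
      if l.getD i 0 > l.getD (i+1) 0 then
        nom_nom_loop fuel ((l.set i (l.getD i 0 + l.getD (i+1) 0)).eraseIdx (i+1)) i
      else
        nom_nom_loop fuel l (i+1)
    else l

def nom_nom (l : List Int) : List Int := nom_nom_loop (2 * l.length + 1) l 0

-- ===== PORT B =====
def nom_nom_alt (l : List Int) : List Int :=
  match l with
  | [] => []
  | c :: rest =>
    let p := rest.foldl (fun (s : List Int × Int) x =>
      if s.2 > x then (s.1, s.2 + x) else (s.1 ++ [s.2], x)) ([], c)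
    p.1 ++ [p.2]

-- ===== PRECONDITION & SPEC =====
def Spec_nom_nom (l : List Int) (out : List Int) : Prop := out = nom_nom_alt l
instance (l : List Int) (out : List Int) : Decidable (Spec_nom_nom l out) := by unfold Spec_nom_nom; infer_instance

-- ===== CLAIM (what is proved, stated in full; the proofs are below) =====
def Claim_equal_nom_nom : Prop := ∀ (l : List Int), Dom_nom_nom l → Spec_nom_nom l (nom_nom l)

-- ===== LEMMAS AND PROOFS =====

-- Reference function: the merged suffix starting from accumulator `cur`.
def eatL (cur : Int) : List Int → List Int
  | [] => [cur]
  | x :: xs => if cur > x then eatL (cur + x) xs else cur :: eatL x xs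

lemma eatL_fold (xs : List Int) (cur : Int) (res : List Int) :
    (let p := xs.foldl (fun (s : List Int × Int) x =>
      if s.2 > x then (s.1, s.2 + x) else (s.1 ++ [s.2], x)) (res, cur)
     p.1 ++ [p.2]) = res ++ eatL cur xs := by
  induction xs generalizing cur res with
  | nil => simp [eatL]
  | cons x xs ih =>
    simp only [List.foldl_cons, eatL]
    by_cases h : cur > x
    · simp [h, ih]
    · simp [h, ih]

lemma getD_mid (pre : List Int) (cur : Int) (xs : List Int) :
    (pre ++ cur :: xs).getD pre.length 0 = cur := by
  simp [List.getD_eq_getElem?_getD]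

lemma loop_eq (fuel : Nat) (xs : List Int) (pre : List Int) (cur : Int)
    (hf : 2 * xs.length + 1 ≤ fuel) :
    nom_nom_loop fuel (pre ++ cur :: xs) pre.length = pre ++ eatL cur xs := by
  induction fuel generalizing pre cur xs with
  | zero => omega
  | succ fuel ih =>
    cases xs with
    | nil =>
      rw [nom_nom_loop]
      simp [eatL]
    | cons x xs =>
      rw [nom_nom_loop]
      have hlen : pre.length + 1 < (pre ++ cur :: x :: xs).length := by simp
      have h1 : (pre ++ cur :: x :: xs).getD pre.length 0 = cur := getD_mid pre cur (x :: xs)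
      have h2 : (pre ++ cur :: x :: xs).getD (pre.length + 1) 0 = x := by
        have := getD_mid (pre ++ [cur]) x xs
        simp only [List.length_append, List.length_cons, List.length_nil, List.append_assoc,
          List.cons_append, List.nil_append] at this
        exact this
      rw [if_pos hlen, h1, h2]
      by_cases h : cur > x
      · have hset : (pre ++ cur :: x :: xs).set pre.length (cur + x) = pre ++ (cur + x) :: x :: xs := by
          rw [List.set_append_right _ _ (le_refl _)]
          simp
        have herase : (pre ++ (cur + x) :: x :: xs).eraseIdx (pre.length + 1)
            = pre ++ (cur + x) :: xs := by
          have : pre ++ (cur + x) :: x :: xs = (pre ++ [cur + x]) ++ x :: xs := by simp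
          rw [this, List.eraseIdx_append_of_length_le (by simp)]
          simp
        rw [if_pos h, hset, herase,
          ih xs pre (cur + x) (by simp at hf ⊢; omega)]
        simp [eatL, h]
      · have : pre ++ cur :: x :: xs = (pre ++ [cur]) ++ x :: xs := by simp
        rw [if_neg h, this]
        have := ih xs (pre ++ [cur]) x (by simp at hf ⊢; omega)
        simp only [List.length_append, List.length_cons, List.length_nil] at this
        rw [this]
        simp [eatL, h]

-- ===== VERDICT (by name: the statement is the Claim_ definition above) =====
theorem nom_nom_spec : Claim_equal_nom_nom := by
  intro l _
  unfold Spec_nom_nom nom_nom nom_nom_alt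
  cases l with
  | nil => rw [nom_nom_loop]; simp
  | cons c rest =>
    have := loop_eq (2 * (c :: rest).length + 1) rest [] c (by simp)
    simpa using this.trans (by simpa using (eatL_fold rest c []).symm)
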